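-- pv_equiv track=rewrite | github.com/Annu-1606/Optimised_TLB_misses | analyze.py | generate_large_page_addresses
-- ===== SOURCE A (Python) =====
-- def generate_large_page_addresses(start, end, count):
--     """
--     Generate count aligned addresses for large pages between start and end.
--
--     :param start: Start address (inclusive).
--     :param end: End address (exclusive).
--     :param count: Number of addresses to generate.
--     :return: List of valid aligned addresses.
--     """
--     addresses = []
--
--     # Align the start address to the nearest 2MB boundary
--     start = (start + (2 * 1024 * 1024) - 1) & ~((2 * 1024 * 1024) - 1)
--
--     for i in range(count):
--         address = start + i * (2 * 1024 * 1024)  # Increment by 2MB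
--         if address < end:
--             addresses.append(address)
--         else:
--             break
--
--     return addresses
-- ===== SOURCE B (Python) =====
-- def generate_large_page_addresses(start, end, count):
--     """Build the result back-to-front: compute the largest address that fits
--     (capped by both count and end), then walk downward to the aligned start,
--     prepending each address."""
--     step = 2 * 1024 * 1024
--     aligned = (start + step - 1) & ~(step - 1)
--     addr = min(aligned + (count - 1) * step,
--                aligned + ((end - 1 - aligned) // step) * step)
--     result = []
--     while addr >= aligned:
--         result = [addr] + result
--         addr -= step
--     return result
-- ===== Notes on version B (the rewrite author's own statement) =====
-- stated objective: alternative
-- what changed: Instead of A's ascending append-and-break loop over range(count), B computes the largest fitting address (capped by both count and end) and builds the list back-to-front by a descending while-loop that prepends each address.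
import Mathlib
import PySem

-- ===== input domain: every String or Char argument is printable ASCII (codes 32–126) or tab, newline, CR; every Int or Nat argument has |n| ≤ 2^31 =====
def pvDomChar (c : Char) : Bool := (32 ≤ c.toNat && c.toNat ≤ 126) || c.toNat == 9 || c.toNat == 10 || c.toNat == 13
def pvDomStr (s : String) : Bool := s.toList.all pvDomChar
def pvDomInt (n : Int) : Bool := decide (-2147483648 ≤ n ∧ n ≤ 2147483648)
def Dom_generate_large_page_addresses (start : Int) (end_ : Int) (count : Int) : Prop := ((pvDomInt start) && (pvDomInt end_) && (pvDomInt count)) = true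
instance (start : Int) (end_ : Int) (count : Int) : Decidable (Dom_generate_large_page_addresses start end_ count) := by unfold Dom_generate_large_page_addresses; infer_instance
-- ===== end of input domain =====

-- B replaces A's ascending append-and-break loop by computing the largest fitting
-- address and building the list back-to-front with a descending prepend loop
-- (objective: alternative).

-- ===== PORT A =====
-- for i in range(count): append while address < end, else break  (acc carries 'addresses')
def pvALoop (alignedStart end_ : Int) (acc : List Int) : List Int → List Int
  | [] => acc
  | i :: rest =>
    let address := alignedStart + i * (2 * 1024 * 1024)
    if address < end_ then pvALoop alignedStart end_ (acc ++ [address]) rest else acc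

def generate_large_page_addresses (start : Int) (end_ : Int) (count : Int) : List Int :=
  -- start = (start + 2MB - 1) & ~(2MB - 1); Python's ~n is Int.not n, & is PySem.Int.band
  let start' := PySem.Int.band (start + (2 * 1024 * 1024) - 1) (Int.not ((2 * 1024 * 1024) - 1))
  pvALoop start' end_ [] (PySem.List.pyRange 0 count 1)

-- ===== PORT B =====
-- while addr >= aligned: result = [addr] + result; addr -= step
def pvBLoop (aligned : Int) (addr : Int) (acc : List Int) : List Int :=
  if _h : aligned ≤ addr then pvBLoop aligned (addr - 2 * 1024 * 1024) (addr :: acc) else acc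
  termination_by (addr - aligned + 1).toNat
  decreasing_by omega

def generate_large_page_addresses_alt (start : Int) (end_ : Int) (count : Int) : List Int :=
  let step : Int := 2 * 1024 * 1024
  let aligned := PySem.Int.band (start + step - 1) (Int.not (step - 1))
  let addr := min (aligned + (count - 1) * step)
                  (aligned + PySem.Int.floordiv (end_ - 1 - aligned) step * step)
  pvBLoop aligned addr []

-- ===== PRECONDITION & SPEC =====
def Spec_generate_large_page_addresses (start : Int) (end_ : Int) (count : Int) (out : List Int) : Prop := out = generate_large_page_addresses_alt start end_ count
instance (start : Int) (end_ : Int) (count : Int) (out : List Int) : Decidable (Spec_generate_large_page_addresses start end_ count out) := by unfold Spec_generate_large_page_addresses; infer_instance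

-- ===== CLAIM (what is proved, stated in full; the proofs are below) =====
def Claim_equal_generate_large_page_addresses : Prop := ∀ (start : Int) (end_ : Int) (count : Int), Dom_generate_large_page_addresses start end_ count → Spec_generate_large_page_addresses start end_ count (generate_large_page_addresses start end_ count)

-- ===== LEMMAS AND PROOFS =====

-- A's loop over range(lo,hi) stops at the first i with s + i*2MB ≥ e; given the global
-- bracket 'i < K ↔ s + i*2MB < e', it produces exactly the progression up to min hi K.
lemma pvALoop_eq (s e K : Int) (hK : ∀ i : Int, s + i * (2 * 1024 * 1024) < e ↔ i < K) :
    ∀ (d : Nat) (lo hi : Int) (acc : List Int), (hi - lo).toNat = d →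
    pvALoop s e acc (PySem.List.pyRange lo hi 1)
      = acc ++ (PySem.List.pyRange lo (min hi K) 1).map (fun i => s + i * (2 * 1024 * 1024)) := by
  intro d
  induction d with
  | zero =>
    intro lo hi acc h
    have hle : hi ≤ lo := by omega
    rw [PySem.List.pyRange_one_eq_nil hle,
        PySem.List.pyRange_one_eq_nil (by omega : min hi K ≤ lo)]
    simp [pvALoop]
  | succ d ih =>
    intro lo hi acc h
    have hlt : lo < hi := by omega
    rw [PySem.List.pyRange_one_cons hlt]
    by_cases hc : lo < K
    · have : s + lo * (2 * 1024 * 1024) < e := (hK lo).mpr hc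
      simp only [pvALoop, this, if_pos]
      rw [ih (lo + 1) hi (acc ++ [s + lo * (2 * 1024 * 1024)]) (by omega)]
      rw [PySem.List.pyRange_one_cons (by omega : lo < min hi K)]
      simp
    · have : ¬ s + lo * (2 * 1024 * 1024) < e := fun hx => hc ((hK lo).mp hx)
      simp only [pvALoop, this, if_neg, not_false_iff]
      rw [PySem.List.pyRange_one_eq_nil (by omega : min hi K ≤ lo)]
      simp

-- B's descending loop started at s + (m-1)*2MB prepends its way down to s,
-- producing the ascending progression of the first m multiples in front of acc.
lemma pvBLoop_eq (s : Int) :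
    ∀ (d : Nat) (m : Int) (acc : List Int), m.toNat = d →
    pvBLoop s (s + (m - 1) * (2 * 1024 * 1024)) acc
      = (PySem.List.pyRange 0 m 1).map (fun i => s + i * (2 * 1024 * 1024)) ++ acc := by
  intro d
  induction d with
  | zero =>
    intro m acc h
    have hm : m ≤ 0 := by omega
    rw [pvBLoop, dif_neg (by nlinarith : ¬ s ≤ s + (m - 1) * (2 * 1024 * 1024)),
        PySem.List.pyRange_one_eq_nil hm]
    simp
  | succ d ih =>
    intro m acc h
    have hm : 1 ≤ m := by omega
    rw [pvBLoop, dif_pos (by nlinarith : s ≤ s + (m - 1) * (2 * 1024 * 1024))]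
    have harg : s + (m - 1) * (2 * 1024 * 1024) - 2 * 1024 * 1024
        = s + ((m - 1) - 1) * (2 * 1024 * 1024) := by ring
    rw [harg, ih (m - 1) _ (by omega)]
    rw [PySem.List.pyRange_one_append 0 (m - 1) m (by omega) (by omega),
        PySem.List.pyRange_one_cons (by omega : m - 1 < m),
        PySem.List.pyRange_one_eq_nil (by omega : m ≤ m - 1 + 1)]
    simp

-- ===== VERDICT (by name: the statement is the Claim_ definition above) =====
theorem generate_large_page_addresses_spec : Claim_equal_generate_large_page_addresses := by
  intro start end_ count _
  unfold Spec_generate_large_page_addresses generate_large_page_addresses generate_large_page_addresses_alt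
  dsimp only
  set step : Int := 2 * 1024 * 1024 with hstep
  set s := PySem.Int.band (start + step - 1) (Int.not (step - 1)) with hs
  set q := PySem.Int.floordiv (end_ - 1 - s) step with hq
  have hqspec : q * step ≤ end_ - 1 - s ∧ end_ - 1 - s < (q + 1) * step :=
    (PySem.Int.floordiv_eq_iff_of_pos (by norm_num [hstep])).mp rfl
  have hiff : ∀ i : Int, s + i * step < end_ ↔ i < q + 1 := by
    intro i
    constructor
    · intro hx
      by_contra hge
      push Not at hge
      have : (q + 1) * step ≤ i * step :=
        mul_le_mul_of_nonneg_right hge (by norm_num [hstep])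
      omega
    · intro hlt
      have : i * step ≤ q * step :=
        mul_le_mul_of_nonneg_right (by omega) (by norm_num [hstep])
      omega
  have hA := pvALoop_eq s end_ (q + 1) hiff (count - 0).toNat 0 count [] rfl
  simp only [List.nil_append] at hA
  rw [hA]
  -- B's starting address is s + (min count (q+1) - 1) * step
  have haddr : min (s + (count - 1) * step) (s + q * step)
      = s + (min count (q + 1) - 1) * step := by
    rcases le_total count (q + 1) with hcq | hcq
    · rw [min_eq_left (by nlinarith), min_eq_left hcq]
    · rw [min_eq_right (by nlinarith), min_eq_right hcq]
      ring
  rw [haddr, pvBLoop_eq s (min count (q + 1)).toNat (min count (q + 1)) [] rfl]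
  simp
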